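-- pv_equiv track=rewrite | github.com/AlanRMA/CodeForces-Solutions | training/subtring_slicing.py | encontrar_maiores_substrings
-- ===== SOURCE A (Python) =====
-- def encontrar_maiores_substrings(s):
--     substrings = []
--     n = len(s)
--     i = 0
--
--     while i < n:
--         # Encontrar o começo da substring (deve ser 'A')
--         if s[i] == 'A':
--             j = i
--             # Contar quantos 'A' seguidos existem
--             while j < n and s[j] == 'A':
--                 j += 1
--             # Encontrar o final da substring (deve ser 'B')
--             k = j
--             while k < n and s[k] == 'B':
--                 k += 1
--             # Verificar se a substring é válida (tem pelo menos um 'A' e um 'B')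
--             if j > i and k > j:
--                 substrings.append(s[i:k])
--                 i = k  # Continuar a busca após o final desta substring
--             else:
--                 i = j  # Continuar a busca após os 'A' encontrados
--         else:
--             i += 1
--
--     return substrings
-- ===== SOURCE B (Python) =====
-- def encontrar_maiores_substrings(s):
--     # Split s into maximal single-character runs, then emit each A-run
--     # immediately followed by a B-run.
--     runs = []
--     cur = None
--     cnt = 0
--     for c in s:
--         if c == cur:
--             cnt += 1
--         else:
--             if cnt:
--                 runs.append((cur, cnt))
--             cur, cnt = c, 1
--     if cnt:
--         runs.append((cur, cnt))
--     return ['A' * a + 'B' * b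
--             for (c1, a), (c2, b) in zip(runs, runs[1:])
--             if c1 == 'A' and c2 == 'B']
-- ===== Notes on version B (the rewrite author's own statement) =====
-- stated objective: alternative
-- what changed: Replaces the index-based scanner (nested while loops re-counting A- and B-runs from each position) with a single run-length-encoding pass followed by a scan over adjacent run pairs that emits each A-run immediately followed by a B-run.
import Mathlib
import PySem

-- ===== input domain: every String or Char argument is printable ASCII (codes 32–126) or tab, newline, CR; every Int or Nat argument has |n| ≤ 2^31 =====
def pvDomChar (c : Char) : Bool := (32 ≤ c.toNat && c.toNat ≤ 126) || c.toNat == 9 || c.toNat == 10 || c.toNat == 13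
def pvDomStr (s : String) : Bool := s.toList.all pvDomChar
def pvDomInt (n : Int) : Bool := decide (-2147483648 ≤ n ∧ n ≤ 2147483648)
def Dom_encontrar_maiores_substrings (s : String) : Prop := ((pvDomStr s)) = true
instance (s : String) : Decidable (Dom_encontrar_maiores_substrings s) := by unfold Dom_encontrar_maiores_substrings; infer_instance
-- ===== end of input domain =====

-- B replaces A's index scanner with run-length encoding + adjacent-pair scan; same O(n) cost (objective: alternative).

-- ===== PORT A =====
-- inner 'while … == c' loops of A: number of leading characters equal to c
def pvLeadCount (c : Char) : List Char → Nat
  | [] => 0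
  | x :: xs => if x = c then pvLeadCount c xs + 1 else 0

theorem pvLeadCount_le (c : Char) (l : List Char) : pvLeadCount c l ≤ l.length := by
  induction l with
  | nil => simp [pvLeadCount]
  | cons x xs ih => simp only [pvLeadCount]; split <;> simp <;> omega

-- A's outer 'while i < n' loop, written on the suffix s[i:]; j-i and k-j are the two lead counts
def pvLoopA : List Char → List String
  | [] => []
  | x :: xs =>
    if x = 'A' then
      let a := pvLeadCount 'A' (x :: xs)
      let b := pvLeadCount 'B' ((x :: xs).drop a)
      if 0 < b then
        String.mk ((x :: xs).take (a + b)) :: pvLoopA ((x :: xs).drop (a + b))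
      else
        pvLoopA ((x :: xs).drop a)
    else
      pvLoopA xs
  termination_by l => l.length
  decreasing_by
    · have h := pvLeadCount_le 'B' ((x :: xs).drop (pvLeadCount 'A' (x :: xs)))
      have h2 : 1 ≤ pvLeadCount 'A' (x :: xs) := by simp_all [pvLeadCount]
      simp only [List.length_drop, List.length_cons] at *
      omega
    · have h2 : 1 ≤ pvLeadCount 'A' (x :: xs) := by simp_all [pvLeadCount]
      simp only [List.length_drop, List.length_cons]
      omega
    · simp

def encontrar_maiores_substrings (s : String) : List String := pvLoopA s.toList

-- ===== PORT B =====
-- B's for-loop state: (runs so far, current run char, current run length)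
def pvRunStep (st : List (Char × Nat) × Option Char × Nat) (c : Char) :
    List (Char × Nat) × Option Char × Nat :=
  match st with
  | (runs, cur, cnt) =>
    if some c = cur then (runs, cur, cnt + 1)
    else ((if cnt ≠ 0 then runs ++ (match cur with | some c0 => [(c0, cnt)] | none => []) else runs),
          some c, 1)

-- B's final 'if cnt: runs.append((cur, cnt))'
def pvFlush (st : List (Char × Nat) × Option Char × Nat) : List (Char × Nat) :=
  match st with
  | (runs, cur, cnt) =>
    if cnt ≠ 0 then runs ++ (match cur with | some c0 => [(c0, cnt)] | none => []) else runs

def pvRunsB (l : List Char) : List (Char × Nat) := pvFlush (l.foldl pvRunStep ([], none, 0))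

def encontrar_maiores_substrings_alt (s : String) : List String :=
  let runs := pvRunsB s.toList
  (runs.zip runs.tail).filterMap (fun p =>
    if p.1.1 = 'A' ∧ p.2.1 = 'B' then
      some (String.mk (List.replicate p.1.2 'A' ++ List.replicate p.2.2 'B'))
    else none)

-- ===== PRECONDITION & SPEC =====
def Spec_encontrar_maiores_substrings (s : String) (out : List String) : Prop := out = encontrar_maiores_substrings_alt s
instance (s : String) (out : List String) : Decidable (Spec_encontrar_maiores_substrings s out) := by unfold Spec_encontrar_maiores_substrings; infer_instance

-- ===== CLAIM (what is proved, stated in full; the proofs are below) =====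
def Claim_equal_encontrar_maiores_substrings : Prop := ∀ (s : String), Dom_encontrar_maiores_substrings s → Spec_encontrar_maiores_substrings s (encontrar_maiores_substrings s)

-- ===== LEMMAS AND PROOFS =====

-- canonical run-length encoding, structural form
def pvRunsAux (c : Char) (n : Nat) : List Char → List (Char × Nat)
  | [] => [(c, n)]
  | x :: xs => if x = c then pvRunsAux c (n + 1) xs else (c, n) :: pvRunsAux x 1 xs

def pvRuns : List Char → List (Char × Nat)
  | [] => []
  | x :: xs => pvRunsAux x 1 xs

-- canonical pair scan
def pvPairs : List (Char × Nat) → List String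
  | (c1, a) :: (c2, b) :: t =>
      (if c1 = 'A' ∧ c2 = 'B' then
        [String.mk (List.replicate a 'A' ++ List.replicate b 'B')] else []) ++
      pvPairs ((c2, b) :: t)
  | _ => []

theorem pvRunsB_loop (l : List Char) (runs : List (Char × Nat)) (c0 : Char) (n : Nat)
    (hn : n ≠ 0) :
    pvFlush (l.foldl pvRunStep (runs, some c0, n)) = runs ++ pvRunsAux c0 n l := by
  induction l generalizing runs c0 n with
  | nil => simp [pvFlush, pvRunsAux, hn]
  | cons x xs ih =>
    by_cases hx : x = c0
    · subst hx
      simp [List.foldl_cons, pvRunStep, ih runs x (n+1) (by omega), pvRunsAux]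
    · have : ¬ (some x = some c0) := by simp [hx]
      simp [List.foldl_cons, pvRunStep, this, hn, hx, ih _ x 1 (by omega), pvRunsAux,
        List.append_assoc]

theorem pvRunsB_eq (l : List Char) : pvRunsB l = pvRuns l := by
  cases l with
  | nil => simp [pvRunsB, pvFlush, pvRuns]
  | cons x xs =>
    simp only [pvRunsB, List.foldl_cons, pvRunStep]
    have : ¬ (some x = (none : Option Char)) := by simp
    simp [this, pvRunsB_loop xs [] x 1 (by omega), pvRuns]

theorem pvPairs_zip (runs : List (Char × Nat)) :
    (runs.zip runs.tail).filterMap (fun p =>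
      if p.1.1 = 'A' ∧ p.2.1 = 'B' then
        some (String.mk (List.replicate p.1.2 'A' ++ List.replicate p.2.2 'B'))
      else none) = pvPairs runs := by
  match runs with
  | [] => simp [pvPairs]
  | [(c, n)] => simp [pvPairs]
  | (c1, a) :: (c2, b) :: t =>
    simp only [List.tail_cons, List.zip_cons_cons, List.filterMap_cons, pvPairs]
    have := pvPairs_zip ((c2, b) :: t)
    split_ifs with h <;> simp_all

-- pvRunsAux in terms of lead counts
theorem pvRunsAux_eq (c : Char) (n : Nat) (l : List Char) :
    pvRunsAux c n l = (c, n + pvLeadCount c l) :: pvRuns (l.drop (pvLeadCount c l)) := by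
  induction l generalizing c n with
  | nil => simp [pvRunsAux, pvLeadCount, pvRuns]
  | cons x xs ih =>
    by_cases hx : x = c
    · subst hx
      simp only [pvRunsAux, pvLeadCount, ih]
      simp [List.cons.injEq, Prod.mk.injEq]
      omega
    · simp [pvRunsAux, pvLeadCount, hx, pvRuns]

theorem pvRuns_cons (x : Char) (xs : List Char) :
    pvRuns (x :: xs) =
      (x, pvLeadCount x (x :: xs)) :: pvRuns ((x :: xs).drop (pvLeadCount x (x :: xs))) := by
  show pvRunsAux x 1 xs = _
  rw [pvRunsAux_eq]
  simp only [pvLeadCount]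
  simp [List.cons.injEq, Prod.mk.injEq]
  omega

-- a first run whose char is not 'A' contributes nothing
theorem pvPairs_not_A (c : Char) (n : Nat) (t : List (Char × Nat)) (hc : c ≠ 'A') :
    pvPairs ((c, n) :: t) = pvPairs t := by
  match t with
  | [] => simp [pvPairs]
  | (c2, b) :: t' => simp [pvPairs, hc]

theorem pvLeadCount_take (c : Char) (l : List Char) :
    l.take (pvLeadCount c l) = List.replicate (pvLeadCount c l) c := by
  induction l with
  | nil => simp [pvLeadCount]
  | cons x xs ih =>
    by_cases hx : x = c
    · subst hx; simp [pvLeadCount, List.replicate_succ, ih]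
    · simp [pvLeadCount, hx]

-- one prepended char (≠ 'A') does not change the pair scan
theorem pvPairs_runs_cons (x : Char) (xs : List Char) (hx : x ≠ 'A') :
    pvPairs (pvRuns (x :: xs)) = pvPairs (pvRuns xs) := by
  cases hxs : xs with
  | nil => simp [pvRuns, pvRunsAux, pvPairs]
  | cons y ys =>
    by_cases hy : y = x
    · rw [hy] at hxs ⊢
      rw [pvRuns_cons, pvRuns_cons]
      have h1 : pvLeadCount x (x :: x :: ys) = pvLeadCount x (x :: ys) + 1 := by
        simp [pvLeadCount]
      have h2 : (x :: x :: ys).drop (pvLeadCount x (x :: x :: ys)) =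
          (x :: ys).drop (pvLeadCount x (x :: ys)) := by
        rw [h1]; simp
      rw [h2, pvPairs_not_A _ _ _ hx, pvPairs_not_A _ _ _ hx]
    · have h1 : pvLeadCount x (x :: y :: ys) = 1 := by
        simp [pvLeadCount, hy]
      conv_lhs => rw [pvRuns_cons, h1]
      simp only [List.drop_succ_cons, List.drop_zero]
      rw [pvPairs_not_A _ _ _ hx]

theorem pvLoopA_eq_pairs_aux (n : Nat) :
    ∀ l : List Char, l.length ≤ n → pvLoopA l = pvPairs (pvRuns l) := by
  induction n with
  | zero =>
    intro l hl
    have : l = [] := by cases l <;> simp_all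
    subst this
    simp [pvLoopA, pvRuns, pvPairs]
  | succ n ih =>
    intro l hl
    cases l with
    | nil => simp [pvLoopA, pvRuns, pvPairs]
    | cons x xs =>
      by_cases hx : x = 'A'
      · subst hx
        rw [pvLoopA]
        set a := pvLeadCount 'A' ('A' :: xs) with ha
        have ha1 : 1 ≤ a := by rw [ha]; simp [pvLeadCount]
        set l2 := ('A' :: xs).drop a with hl2
        set b := pvLeadCount 'B' l2 with hb
        have halen : a ≤ ('A' :: xs).length := pvLeadCount_le 'A' ('A' :: xs)
        by_cases hbpos : 0 < b
        · rw [if_pos hbpos]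
          have hl2ne : l2 ≠ [] := by
            intro h; rw [h] at hb; simp [pvLeadCount] at hb; omega
          obtain ⟨y, ys, hys⟩ := List.exists_cons_of_ne_nil hl2ne
          have hyB : y = 'B' := by
            rw [hys] at hb; simp only [pvLeadCount] at hb
            by_contra hy; simp [hy] at hb; omega
          have hruns2 : pvRuns l2 = ('B', b) :: pvRuns (l2.drop b) := by
            subst hyB
            rw [hys] at hb
            rw [hys, pvRuns_cons, ← hb]
          have hdrop : ('A' :: xs).drop (a + b) = l2.drop b := by
            rw [hl2, List.drop_drop]
          have hblen : b ≤ l2.length := pvLeadCount_le 'B' l2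
          have hrec : pvLoopA (('A' :: xs).drop (a + b)) =
              pvPairs (pvRuns (('A' :: xs).drop (a + b))) := by
            apply ih
            simp only [List.length_drop, List.length_cons] at hl ⊢
            omega
          have htake : ('A' :: xs).take (a + b) = List.replicate a 'A' ++ List.replicate b 'B' := by
            rw [List.take_add, ← hl2]
            congr 1
            · rw [ha]; exact pvLeadCount_take 'A' ('A' :: xs)
            · rw [hb]; exact pvLeadCount_take 'B' l2
          rw [pvRuns_cons, ← ha, ← hl2, hruns2, hrec, hdrop, htake]
          show _ = pvPairs (('A', a) :: ('B', b) :: pvRuns (l2.drop b))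
          rw [pvPairs]
          rw [pvPairs_not_A 'B' b _ (by decide)]
          simp
        · rw [if_neg hbpos]
          have hb0 : b = 0 := by omega
          have hrec : pvLoopA l2 = pvPairs (pvRuns l2) := by
            apply ih
            rw [hl2]
            simp only [List.length_drop, List.length_cons] at hl ⊢
            omega
          rw [hrec, pvRuns_cons, ← ha, ← hl2]
          match hr : pvRuns l2 with
          | [] => simp [pvPairs]
          | (c2, m) :: t =>
            have hc2 : c2 ≠ 'B' := by
              cases hl2' : l2 with
              | nil => rw [hl2'] at hr; simp [pvRuns] at hr
              | cons y ys =>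
                rw [hl2', pvRuns_cons] at hr
                have hcy : c2 = y := by
                  injection hr with h1 _; injection h1 with h1' _; exact h1'.symm
                rw [hcy]
                intro hyb
                rw [hl2', hyb] at hb
                simp [pvLeadCount] at hb
                omega
            simp [pvPairs, hc2]
      · rw [pvLoopA]
        simp only [if_neg hx]
        rw [ih xs (by simp at hl; omega), pvPairs_runs_cons x xs hx]

theorem pvLoopA_eq_pairs (l : List Char) : pvLoopA l = pvPairs (pvRuns l) :=
  pvLoopA_eq_pairs_aux l.length l (le_refl _)

-- ===== VERDICT (by name: the statement is the Claim_ definition above) =====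
theorem encontrar_maiores_substrings_spec : Claim_equal_encontrar_maiores_substrings := by
  intro s _
  unfold Spec_encontrar_maiores_substrings encontrar_maiores_substrings encontrar_maiores_substrings_alt
  rw [pvLoopA_eq_pairs, pvRunsB_eq, pvPairs_zip]
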